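-- pv_equiv track=rewrite | github.com/MastewalB/a2sv-competitive-programming | Contest/Camp-Contest/C-10/D.py | min_move
-- ===== SOURCE A (Python) =====
-- def digits(n):
--     d = []
--     while n > 0:
--         d.append(n % 10)
--         n //= 10
--     d.reverse()
--     return d
--
-- def toInt(lst):
--     n = 0
--     for i in range(len(lst)):
--         n += pow(10, i) * lst[i]
--     return n
--
-- def increase_by_one(N):
--     d = digits(N)
--     d.reverse()
--     i = 0
--     while i < len(d) and d[i] == 0:
--         i += 1
--     carry = 1
--     d[i] = 0
--     i += 1
--     while True:
--         if i >= len(d):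
--             d.append(1)
--             break
--         d[i] += carry
--         if d[i] > 9:
--             d[i] = d[i] % 10
--             carry = 1
--         else:
--             break
--         i += 1
--
--     return (sum(d), toInt(d))
--
-- def min_move(n, s):
--     if n <= s:
--         return 0
--     original = n
--     currSum = sum(digits(n))
--
--     while currSum > s:
--         currSum, n = increase_by_one(n)
--
--     return n - original
-- ===== SOURCE B (Python) =====
-- def digitsum(m):
--     r = 0
--     while m > 0:
--         r += m % 10
--         m //= 10
--     return r
--
-- def min_move(n, s):
--     if n <= s:
--         return 0
--     t = 1
--     while True:
--         cand = ((n + t - 1) // t) * t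
--         if digitsum(cand) <= s:
--             return cand - n
--         t *= 10
-- ===== Notes on version B (the rewrite author's own statement) =====
-- stated objective: simpler
-- what changed: Replaced the digit-list machinery (digit array, carry-propagation loop, list-to-int reconstruction) with pure integer arithmetic: scan t = 1, 10, 100, ... and return the first round-up candidate ((n+t-1)//t)*t whose digit sum is at most s.
import Mathlib
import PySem

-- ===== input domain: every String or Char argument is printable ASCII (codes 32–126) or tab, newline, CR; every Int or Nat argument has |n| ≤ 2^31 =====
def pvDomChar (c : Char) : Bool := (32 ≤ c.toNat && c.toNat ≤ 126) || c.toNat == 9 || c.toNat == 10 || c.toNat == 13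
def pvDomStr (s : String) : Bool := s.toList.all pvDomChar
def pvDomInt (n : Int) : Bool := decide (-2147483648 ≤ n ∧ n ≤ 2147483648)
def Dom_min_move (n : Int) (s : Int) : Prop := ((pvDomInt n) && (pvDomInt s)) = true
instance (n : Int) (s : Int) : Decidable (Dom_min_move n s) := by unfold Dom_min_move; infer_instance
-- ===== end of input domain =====

-- B replaces A's digit-array machinery (digit list, carry propagation, list→int reconstruction)
-- by plain integer arithmetic scanning round-up candidates ((n+t-1)//t)*t for t = 1, 10, 100, …
-- (objective: simpler).

-- ===== PORT A =====

-- `digits`: while n > 0: d.append(n % 10); n //= 10  — then d.reverse()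
def digitsLoopA (m : Int) (acc : List Int) : List Int :=
  if h : 0 < m then digitsLoopA (PySem.Int.floordiv m 10) (acc ++ [PySem.Int.mod m 10]) else acc
termination_by m.toNat
decreasing_by
  rw [PySem.Int.floordiv_eq_ediv_of_pos (by norm_num : (0:Int) < 10)]
  omega

def digitsA (m : Int) : List Int := (digitsLoopA m []).reverse

-- `toInt`: n += pow(10, i) * lst[i] over range(len(lst)); every index is in range — exact
def toIntA (lst : List Int) : Int :=
  (List.range lst.length).foldl (fun acc i => acc + (10:Int) ^ i * lst.getD i 0) 0

-- `while i < len(d) and d[i] == 0: i += 1`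
def skipZA (d : List Int) (i : Nat) : Nat :=
  if h : i < d.length then (if d.getD i 0 = 0 then skipZA d (i + 1) else i) else i
termination_by d.length - i

-- the `while True` carry loop of increase_by_one (carry is always 1 when the loop runs)
def propagateA (d : List Int) (i : Nat) : List Int :=
  if h : i < d.length then
    let d' := d.set i (d.getD i 0 + 1)
    if 9 < d'.getD i 0 then propagateA (d'.set i (PySem.Int.mod (d'.getD i 0) 10)) (i + 1)
    else d'
  else d ++ [1]
termination_by d.length - i
decreasing_by simp; omega

def increaseA (N : Int) : Int × Int :=
  let d := (digitsA N).reverse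
  let i := skipZA d 0
  -- Python `d[i] = 0` raises IndexError when i = len(d) (only for N ≤ 0, outside Pre_);
  -- List.set is a no-op there
  let d2 := d.set i 0
  let d3 := propagateA d2 (i + 1)
  (d3.sum, toIntA d3)

-- `while currSum > s: currSum, n = increase_by_one(n)`; fuel 64 only makes the loop total:
-- every admitted input terminates in at most 12 iterations
def minMoveLoopA (s : Int) : Nat → Int → Int → Int
  | 0, _, m => m
  | fuel + 1, currSum, m =>
    if s < currSum then
      let p := increaseA m
      minMoveLoopA s fuel p.1 p.2
    else m

def min_move (n : Int) (s : Int) : Int :=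
  if n ≤ s then 0
  else minMoveLoopA s 64 (digitsA n).sum n - n

-- ===== PORT B =====

-- `digitsum`: r = 0; while m > 0: r += m % 10; m //= 10
def digitSumLoopB (m : Int) (r : Int) : Int :=
  if h : 0 < m then digitSumLoopB (PySem.Int.floordiv m 10) (r + PySem.Int.mod m 10) else r
termination_by m.toNat
decreasing_by
  rw [PySem.Int.floordiv_eq_ediv_of_pos (by norm_num : (0:Int) < 10)]
  omega

def digitsumB (m : Int) : Int := digitSumLoopB m 0

-- `while True: cand = ((n+t-1)//t)*t; if digitsum(cand) <= s: return cand - n; t *= 10`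
-- fuel 64 only makes the loop total: every admitted input returns within 12 rounds
def minMoveLoopB (n : Int) (s : Int) : Nat → Int → Int
  | 0, _ => 0
  | fuel + 1, t =>
    let cand := PySem.Int.floordiv (n + t - 1) t * t
    if digitsumB cand ≤ s then cand - n else minMoveLoopB n s fuel (t * 10)

def min_move_alt (n : Int) (s : Int) : Int :=
  if n ≤ s then 0 else minMoveLoopB n s 64 1

-- ===== PRECONDITION & SPEC =====

-- Pre_ excludes exactly the inputs on which Python A never returns: for n > s with s ≤ 0 the
-- digit sum can never drop to ≤ s, so A loops forever (and raises IndexError once n ≤ 0).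
def Pre_min_move (n : Int) (s : Int) : Prop := n ≤ s ∨ 1 ≤ s
instance (n : Int) (s : Int) : Decidable (Pre_min_move n s) := by unfold Pre_min_move; infer_instance

def pvWitness_min_move : Int × Int := (517, 3)

def Spec_min_move (n : Int) (s : Int) (out : Int) : Prop := out = min_move_alt n s
instance (n : Int) (s : Int) (out : Int) : Decidable (Spec_min_move n s out) := by unfold Spec_min_move; infer_instance

-- ===== CLAIM (what is proved, stated in full; the proofs are below) =====
def Claim_equal_min_move : Prop := ∀ (n : Int) (s : Int), Dom_min_move n s → Pre_min_move n s → Spec_min_move n s (min_move n s)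

-- ===== LEMMAS AND PROOFS =====

-- low-order-first digit list of m (proof-side characterisation of the digit loops)
def lowDigits (m : Int) : List Int :=
  if h : 0 < m then PySem.Int.mod m 10 :: lowDigits (PySem.Int.floordiv m 10) else []
termination_by m.toNat
decreasing_by
  rw [PySem.Int.floordiv_eq_ediv_of_pos (by norm_num : (0:Int) < 10)]
  omega

-- value of a low-order-first digit list
def dval : List Int → Int
  | [] => 0
  | x :: xs => x + 10 * dval xs

def dvalid (l : List Int) : Prop := ∀ x ∈ l, 0 ≤ x ∧ x < 10

-- mathematical name for B's candidate formula
def roundup (n t : Int) : Int := PySem.Int.floordiv (n + t - 1) t * t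

-- adding 1 with carry to a low-order-first digit list (shape of propagateA's work)
def addOne : List Int → List Int
  | [] => [1]
  | x :: xs => if 9 < x + 1 then PySem.Int.mod (x + 1) 10 :: addOne xs else (x + 1) :: xs

theorem mod10 (m : Int) : PySem.Int.mod m 10 = m % 10 :=
  PySem.Int.mod_eq_emod_of_pos (by norm_num)

theorem div10 (m : Int) : PySem.Int.floordiv m 10 = m / 10 :=
  PySem.Int.floordiv_eq_ediv_of_pos (by norm_num)

theorem lowDigits_nonpos (m : Int) (h : ¬ 0 < m) : lowDigits m = [] := by
  rw [lowDigits]; simp [h]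

theorem lowDigits_pos (m : Int) (h : 0 < m) :
    lowDigits m = m % 10 :: lowDigits (m / 10) := by
  rw [lowDigits]; simp [h]

theorem lowDigits_pos' (m : Int) (h : 0 < m) :
    lowDigits m = PySem.Int.mod m 10 :: lowDigits (PySem.Int.floordiv m 10) := by
  rw [lowDigits]; simp [h]

theorem lowDigits_valid (m : Int) : dvalid (lowDigits m) := by
  induction m using lowDigits.induct with
  | case1 m h ih =>
    rw [lowDigits_pos m h]
    intro x hx
    rcases List.mem_cons.1 hx with rfl | hx
    · omega
    · rw [div10] at ih; exact ih x hx
  | case2 m h =>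
    rw [lowDigits_nonpos m h]; intro x hx; cases hx

theorem dval_lowDigits (m : Int) (h : 0 ≤ m) : dval (lowDigits m) = m := by
  induction m using lowDigits.induct with
  | case1 m hm ih =>
    rw [lowDigits_pos m hm]
    rw [div10] at ih
    simp only [dval]
    rw [ih (by omega)]
    omega
  | case2 m hm =>
    rw [lowDigits_nonpos m hm]
    simp only [dval]
    omega

theorem lowDigits_lastNZ (m : Int) (h : 0 < m) : (lowDigits m).getLast? ≠ some 0 := by
  induction m using lowDigits.induct with
  | case1 m hm ih =>
    rw [lowDigits_pos m hm]
    rw [div10] at ih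
    by_cases hq : 0 < m / 10
    · have hne := ih hq
      rcases hcons : lowDigits (m / 10) with _ | ⟨y, ys⟩
      · rw [lowDigits_pos _ hq] at hcons; simp at hcons
      · rw [hcons] at hne
        rw [List.getLast?_cons_cons]
        exact hne
    · rw [lowDigits_nonpos _ hq]
      have : m % 10 = m := by omega
      simp [this]
      omega
  | case2 m hm => omega

theorem dval_nonneg (l : List Int) (h : dvalid l) : 0 ≤ dval l := by
  induction l with
  | nil => simp [dval]
  | cons x xs ih =>
    have hx := h x (List.mem_cons_self ..)
    have hxs : 0 ≤ dval xs := ih (fun y hy => h y (List.mem_cons_of_mem _ hy))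
    simp only [dval]; omega

theorem dval_pos (l : List Int) (h : dvalid l) (hl : l ≠ []) (hz : l.getLast? ≠ some 0) :
    0 < dval l := by
  induction l with
  | nil => exact absurd rfl hl
  | cons x xs ih =>
    have hx := h x (List.mem_cons_self ..)
    rcases xs with _ | ⟨y, ys⟩
    · have hx0 : x ≠ 0 := by simpa using hz
      have hd : dval [x] = x + 10 * 0 := rfl
      rw [hd]; omega
    · rw [List.getLast?_cons_cons] at hz
      have hpos := ih (fun z hzz => h z (List.mem_cons_of_mem _ hzz)) (by simp) hz
      have hd : dval (x :: y :: ys) = x + 10 * dval (y :: ys) := rfl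
      rw [hd]; omega

theorem lowDigits_dval (l : List Int) (h : dvalid l) (hz : l.getLast? ≠ some 0) :
    lowDigits (dval l) = l := by
  induction l with
  | nil => exact lowDigits_nonpos 0 (by omega)
  | cons x xs ih =>
    have hx := h x (List.mem_cons_self ..)
    have hvxs : dvalid xs := fun y hy => h y (List.mem_cons_of_mem _ hy)
    rcases xs with _ | ⟨y, ys⟩
    · have hx0 : x ≠ 0 := by simpa using hz
      have hd : dval [x] = x + 10 * 0 := rfl
      rw [hd]
      rw [lowDigits_pos _ (by omega)]
      have h1 : (x + 10 * 0) % 10 = x := by omega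
      have h2 : (x + 10 * 0) / 10 = 0 := by omega
      rw [h1, h2, lowDigits_nonpos 0 (by omega)]
    · rw [List.getLast?_cons_cons] at hz
      have hpos : 0 < dval (y :: ys) := dval_pos _ hvxs (by simp) hz
      have hd : dval (x :: y :: ys) = x + 10 * dval (y :: ys) := rfl
      rw [hd]
      rw [lowDigits_pos _ (by omega)]
      have h1 : (x + 10 * dval (y :: ys)) % 10 = x := by omega
      have h2 : (x + 10 * dval (y :: ys)) / 10 = dval (y :: ys) := by omega
      rw [h1, h2, ih hvxs hz]

theorem dval_append (a b : List Int) :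
    dval (a ++ b) = dval a + 10 ^ a.length * dval b := by
  induction a with
  | nil => simp [dval]
  | cons x xs ih =>
    simp only [List.cons_append, dval, ih, List.length_cons]
    ring

theorem dval_replicate_zero (k : Nat) : dval (List.replicate k 0) = 0 := by
  induction k with
  | zero => simp [dval]
  | succ k ih => rw [List.replicate_succ]; simp only [dval, ih]; ring

theorem digitsLoopA_eq (m : Int) : ∀ acc, digitsLoopA m acc = acc ++ lowDigits m := by
  induction m using lowDigits.induct with
  | case1 m h ih =>
    intro acc
    rw [digitsLoopA]
    simp only [h, dite_true]
    rw [ih, lowDigits_pos' m h, List.append_assoc]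
    simp
  | case2 m h =>
    intro acc
    rw [digitsLoopA]
    simp [h, lowDigits_nonpos m h]

theorem digitsA_reverse (m : Int) : (digitsA m).reverse = lowDigits m := by
  simp [digitsA, digitsLoopA_eq]

theorem digitsA_sum (m : Int) : (digitsA m).sum = (lowDigits m).sum := by
  rw [← List.sum_reverse, digitsA_reverse]

theorem toIntA_eq_dval (l : List Int) : toIntA l = dval l := by
  induction l using List.reverseRecOn with
  | nil => simp [toIntA, dval]
  | append_singleton as x ih =>
    unfold toIntA
    rw [List.length_append, List.length_singleton, List.range_succ, List.foldl_append]
    have hcong : (List.range as.length).foldl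
        (fun acc i => acc + (10:Int) ^ i * (as ++ [x]).getD i 0) 0
        = (List.range as.length).foldl (fun acc i => acc + (10:Int) ^ i * as.getD i 0) 0 := by
      apply PySem.List.foldl_congr_mem
      intro acc i hi
      rw [List.getD_append as [x] 0 i (List.mem_range.1 hi)]
    rw [hcong]
    have hlast : (as ++ [x]).getD as.length 0 = x := by
      simp
    rw [List.foldl_cons, List.foldl_nil, hlast]
    rw [show (List.range as.length).foldl (fun acc i => acc + (10:Int) ^ i * as.getD i 0) 0
        = toIntA as from rfl, ih, dval_append]
    simp [dval]

theorem getD_append_length (pre : List Int) (y : Int) (l2 : List Int) :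
    (pre ++ y :: l2).getD pre.length 0 = y := by
  simp [List.getD_eq_getElem?_getD]

theorem skipZA_spec (k : Nat) (a : Int) (rest : List Int) (ha : a ≠ 0) :
    ∀ d j, j ≤ k → k - j = d → skipZA (List.replicate k 0 ++ a :: rest) j = k := by
  intro d
  induction d with
  | zero =>
    intro j hj hd
    have hjk : j = k := by omega
    subst hjk
    rw [skipZA]
    have hlen : j < (List.replicate j (0:Int) ++ a :: rest).length := by
      simp
    rw [dif_pos hlen]
    have hget : (List.replicate j (0:Int) ++ a :: rest).getD j 0 = a := by
      have := getD_append_length (List.replicate j (0:Int)) a rest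
      simpa using this
    rw [hget, if_neg ha]
  | succ d ih =>
    intro j hj hd
    have hjk : j < k := by omega
    rw [skipZA]
    have hlen : j < (List.replicate k (0:Int) ++ a :: rest).length := by
      simp; omega
    rw [dif_pos hlen]
    have hget : (List.replicate k (0:Int) ++ a :: rest).getD j 0 = 0 := by
      simp [List.getD_eq_getElem?_getD,
        List.getElem?_append_left (by simp; omega : j < (List.replicate k (0:Int)).length)]
    rw [hget, if_pos rfl]
    exact ih (j + 1) (by omega) (by omega)

theorem set_append_length (pre : List Int) (y v : Int) (l2 : List Int) :
    (pre ++ y :: l2).set pre.length v = pre ++ v :: l2 := by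
  induction pre with
  | nil => simp
  | cons a as ih => simp [List.set_cons_succ, ih]

theorem propagateA_append (rest : List Int) :
    ∀ pre : List Int, propagateA (pre ++ rest) pre.length = pre ++ addOne rest := by
  induction rest with
  | nil =>
    intro pre
    rw [propagateA]
    rw [dif_neg (by simp)]
    simp [addOne]
  | cons x xs ih =>
    intro pre
    rw [propagateA]
    rw [dif_pos (by simp)]
    simp only
    rw [getD_append_length, set_append_length]
    rw [getD_append_length]
    by_cases hc : 9 < x + 1
    · rw [if_pos hc]
      rw [set_append_length]
      have hassoc : pre ++ PySem.Int.mod (x + 1) 10 :: xs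
          = (pre ++ [PySem.Int.mod (x + 1) 10]) ++ xs := by simp
      have hlen : pre.length + 1 = (pre ++ [PySem.Int.mod (x + 1) 10]).length := by simp
      rw [hassoc, hlen, ih]
      simp [addOne, hc]
    · rw [if_neg hc]
      simp [addOne, hc]

theorem addOne_ne_nil (l : List Int) : addOne l ≠ [] := by
  rcases l with _ | ⟨x, xs⟩ <;> simp [addOne] <;> split <;> simp

theorem addOne_dval (l : List Int) (h : dvalid l) : dval (addOne l) = dval l + 1 := by
  induction l with
  | nil => simp [addOne, dval]
  | cons x xs ih =>
    have hx := h x (List.mem_cons_self ..)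
    have hvxs : dvalid xs := fun y hy => h y (List.mem_cons_of_mem _ hy)
    by_cases hc : 9 < x + 1
    · have hx9 : x = 9 := by omega
      have ha : addOne (x :: xs) = PySem.Int.mod (x + 1) 10 :: addOne xs := by
        simp [addOne, hc]
      rw [ha]
      have hm : PySem.Int.mod (x + 1) 10 = 0 := by rw [mod10]; omega
      have hd1 : dval (PySem.Int.mod (x + 1) 10 :: addOne xs)
          = PySem.Int.mod (x + 1) 10 + 10 * dval (addOne xs) := rfl
      have hd2 : dval (x :: xs) = x + 10 * dval xs := rfl
      rw [hd1, hd2, hm, ih hvxs]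
      omega
    · have ha : addOne (x :: xs) = (x + 1) :: xs := by simp [addOne, hc]
      rw [ha]
      have hd1 : dval ((x + 1) :: xs) = (x + 1) + 10 * dval xs := rfl
      have hd2 : dval (x :: xs) = x + 10 * dval xs := rfl
      rw [hd1, hd2]
      omega

theorem addOne_valid (l : List Int) (h : dvalid l) : dvalid (addOne l) := by
  induction l with
  | nil => intro y hy; simp [addOne] at hy; omega
  | cons x xs ih =>
    have hx := h x (List.mem_cons_self ..)
    have hvxs : dvalid xs := fun y hy => h y (List.mem_cons_of_mem _ hy)
    by_cases hc : 9 < x + 1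
    · have ha : addOne (x :: xs) = PySem.Int.mod (x + 1) 10 :: addOne xs := by
        simp [addOne, hc]
      rw [ha]
      intro y hy
      rcases List.mem_cons.1 hy with rfl | hy
      · rw [mod10]; omega
      · exact ih hvxs y hy
    · have ha : addOne (x :: xs) = (x + 1) :: xs := by simp [addOne, hc]
      rw [ha]
      intro y hy
      rcases List.mem_cons.1 hy with rfl | hy
      · omega
      · exact hvxs y hy

theorem addOne_lastNZ (l : List Int) (h : dvalid l) (hz : l.getLast? ≠ some 0) :
    (addOne l).getLast? ≠ some 0 := by
  induction l with
  | nil => simp [addOne]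
  | cons x xs ih =>
    have hx := h x (List.mem_cons_self ..)
    have hvxs : dvalid xs := fun y hy => h y (List.mem_cons_of_mem _ hy)
    rcases xs with _ | ⟨y, ys⟩
    · have hx0 : x ≠ 0 := by simpa using hz
      by_cases hc : 9 < x + 1
      · have ha : addOne [x] = [PySem.Int.mod (x + 1) 10, 1] := by simp [addOne, hc]
        rw [ha]; simp
      · have ha : addOne [x] = [x + 1] := by simp [addOne, hc]
        rw [ha]; simp; omega
    · rw [List.getLast?_cons_cons] at hz
      have hih := ih hvxs hz
      by_cases hc : 9 < x + 1
      · have ha : addOne (x :: y :: ys) = PySem.Int.mod (x + 1) 10 :: addOne (y :: ys) := by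
          simp [addOne, hc]
        rw [ha]
        obtain ⟨z, zs, hzz⟩ := List.exists_cons_of_ne_nil (addOne_ne_nil (y :: ys))
        rw [hzz] at hih ⊢
        rwa [List.getLast?_cons_cons]
      · have ha : addOne (x :: y :: ys) = (x + 1) :: y :: ys := by simp [addOne, hc]
        rw [ha]
        rwa [List.getLast?_cons_cons]

theorem roundup_spec (n t : Int) (ht : 0 < t) :
    t ∣ roundup n t ∧ n ≤ roundup n t ∧ roundup n t < n + t := by
  unfold roundup
  rw [PySem.Int.floordiv_eq_ediv_of_pos ht]
  have h1 := Int.ediv_add_emod (n + t - 1) t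
  have h2 := Int.emod_nonneg (n + t - 1) (ne_of_gt ht)
  have h3 := Int.emod_lt_of_pos (n + t - 1) ht
  refine ⟨⟨(n + t - 1) / t, mul_comm _ _⟩, ?_, ?_⟩ <;> nlinarith [h1, h2, h3]

theorem roundup_min (n t x : Int) (ht : 0 < t) (hd : t ∣ x) (hx : n ≤ x) :
    roundup n t ≤ x := by
  obtain ⟨c, rfl⟩ := hd
  obtain ⟨⟨q, hq⟩, h2, h3⟩ := roundup_spec n t ht
  rw [hq] at h2 h3 ⊢
  have hqc : q < c + 1 := by
    have hlt : t * q < t * (c + 1) := by nlinarith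
    exact lt_of_mul_lt_mul_left hlt ht.le
  nlinarith

theorem roundup_eq (n t x : Int) (ht : 0 < t) (hd : t ∣ x) (hx : n ≤ x) (hlt : x < n + t) :
    roundup n t = x := by
  obtain ⟨h1, h2, h3⟩ := roundup_spec n t ht
  have hle := roundup_min n t x ht hd hx
  have hdvd : t ∣ (x - roundup n t) := dvd_sub hd h1
  obtain ⟨c, hc⟩ := hdvd
  have hc0 : c = 0 := by
    by_contra hne
    have h4 : 0 ≤ x - roundup n t := by omega
    have h5 : x - roundup n t < t := by omega
    rcases Int.lt_or_le c 0 with hneg | hpos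
    · nlinarith
    · have : 1 ≤ c := by omega
      nlinarith
  rw [hc0, mul_zero] at hc
  omega

theorem exists_decomp (l : List Int) (h : ∃ x ∈ l, x ≠ 0) :
    ∃ i a rest, l = List.replicate i 0 ++ a :: rest ∧ a ≠ 0 := by
  induction l with
  | nil => simp at h
  | cons x xs ih =>
    by_cases hx : x = 0
    · subst hx
      have hxs : ∃ y ∈ xs, y ≠ 0 := by
        obtain ⟨y, hy, hy0⟩ := h
        rcases List.mem_cons.1 hy with rfl | hy
        · exact absurd rfl hy0
        · exact ⟨y, hy, hy0⟩
      obtain ⟨i, a, rest, heq, ha⟩ := ih hxs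
      exact ⟨i + 1, a, rest, by rw [List.replicate_succ, List.cons_append, heq], ha⟩
    · exact ⟨0, x, xs, by simp, hx⟩

theorem increaseA_spec (m : Int) (hm : 0 < m) :
    ∃ i : Nat, (10:Int) ^ i ∣ m ∧ ¬ ((10:Int) ^ (i + 1) ∣ m) ∧
      increaseA m = ((lowDigits (roundup m ((10:Int) ^ (i + 1)))).sum,
                     roundup m ((10:Int) ^ (i + 1))) := by
  have hv := lowDigits_valid m
  have hlast := lowDigits_lastNZ m hm
  have hval := dval_lowDigits m hm.le
  have hne : lowDigits m ≠ [] := by rw [lowDigits_pos m hm]; simp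
  have hexnz : ∃ x ∈ lowDigits m, x ≠ 0 := by
    have hsome : (lowDigits m).getLast?.isSome := by
      obtain ⟨y, ys, hys⟩ := List.exists_cons_of_ne_nil hne
      rw [hys]; simp
    obtain ⟨z, hz⟩ := Option.isSome_iff_exists.1 hsome
    exact ⟨z, List.mem_of_getLast? hz, fun hc => hlast (hc ▸ hz)⟩
  obtain ⟨i, a, rest, hdec, ha⟩ := exists_decomp _ hexnz
  have hva : 0 ≤ a ∧ a < 10 := hv a (by rw [hdec]; exact List.mem_append_right _ (List.mem_cons_self ..))
  have hvrest : dvalid rest := by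
    intro y hy
    exact hv y (by rw [hdec]; exact List.mem_append_right _ (List.mem_cons_of_mem _ hy))
  have hrnn : 0 ≤ dval rest := dval_nonneg rest hvrest
  -- the list built by the port
  have hskip : skipZA (lowDigits m) 0 = i := by
    rw [hdec]; exact skipZA_spec i a rest ha i 0 (by omega) rfl
  have hset : (lowDigits m).set i 0 = List.replicate (i + 1) 0 ++ rest := by
    rw [hdec]
    have := set_append_length (List.replicate i (0:Int)) a 0 rest
    rw [List.length_replicate] at this
    rw [this, List.replicate_succ', List.append_assoc]
    simp
  have hprop : propagateA (List.replicate (i + 1) 0 ++ rest) (i + 1)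
      = List.replicate (i + 1) 0 ++ addOne rest := by
    have := propagateA_append rest (List.replicate (i + 1) (0:Int))
    rwa [List.length_replicate] at this
  set L' := List.replicate (i + 1) (0:Int) ++ addOne rest with hL'
  -- value and digit facts about L'
  have hvL' : dvalid L' := by
    intro y hy
    rcases List.mem_append.1 hy with hy | hy
    · rw [List.eq_of_mem_replicate hy]; omega
    · exact addOne_valid rest hvrest y hy
  have hrestlast : rest ≠ [] → rest.getLast? ≠ some 0 := by
    intro hrne
    rw [hdec] at hlast
    rw [List.getLast?_append_of_ne_nil _ (by simp)] at hlast
    obtain ⟨z, zs, hzz⟩ := List.exists_cons_of_ne_nil hrne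
    rw [hzz] at hlast ⊢
    rwa [List.getLast?_cons_cons] at hlast
  have hzL' : L'.getLast? ≠ some 0 := by
    rw [hL', List.getLast?_append_of_ne_nil _ (addOne_ne_nil rest)]
    rcases hrcase : rest with _ | ⟨z, zs⟩
    · simp [addOne]
    · rw [← hrcase]
      exact addOne_lastNZ rest hvrest (hrestlast (by rw [hrcase]; simp))
  have hdL' : dval L' = 10 ^ (i + 1) * (dval rest + 1) := by
    rw [hL', dval_append, dval_replicate_zero, List.length_replicate,
      addOne_dval rest hvrest]
    ring
  have hmval : m = 10 ^ i * a + 10 ^ (i + 1) * dval rest := by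
    have : dval (lowDigits m) = dval (List.replicate i 0 ++ a :: rest) := by rw [hdec]
    rw [hval, dval_append, dval_replicate_zero, List.length_replicate] at this
    have hcons : dval (a :: rest) = a + 10 * dval rest := rfl
    rw [hcons] at this
    rw [this, pow_succ]
    ring
  have hP : (0:Int) < 10 ^ i := by positivity
  have hdvd : (10:Int) ^ i ∣ m := ⟨a + 10 * dval rest, by rw [hmval, pow_succ]; ring⟩
  have hndvd : ¬ ((10:Int) ^ (i + 1) ∣ m) := by
    rintro ⟨c, hc⟩
    rw [hmval, pow_succ] at hc
    have hcancel : a + 10 * dval rest = 10 * c := by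
      have h10 : (10:Int) ^ i ≠ 0 := by positivity
      apply mul_left_cancel₀ h10
      nlinarith [hc]
    omega
  have hrpos : (0:Int) < 10 ^ (i + 1) := by positivity
  have hru : roundup m ((10:Int) ^ (i + 1)) = 10 ^ (i + 1) * (dval rest + 1) := by
    apply roundup_eq _ _ _ hrpos ⟨dval rest + 1, rfl⟩
    · rw [hmval, pow_succ]
      have haux : (10:Int) ^ i * a ≤ 10 ^ i * 10 :=
        mul_le_mul_of_nonneg_left (by omega) hP.le
      nlinarith [haux]
    · rw [hmval, pow_succ]
      have haux : (10:Int) ^ i * 1 ≤ 10 ^ i * a :=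
        mul_le_mul_of_nonneg_left (by omega) hP.le
      nlinarith [haux]
  have hlow : lowDigits (10 ^ (i + 1) * (dval rest + 1)) = L' := by
    have := lowDigits_dval L' hvL' hzL'
    rwa [hdL'] at this
  refine ⟨i, hdvd, hndvd, ?_⟩
  unfold increaseA
  simp only [digitsA_reverse, hskip, hset, hprop, toIntA_eq_dval, hdL', hru, hlow]

theorem digitSumLoopB_eq (m : Int) : ∀ r, digitSumLoopB m r = r + (lowDigits m).sum := by
  induction m using lowDigits.induct with
  | case1 m h ih =>
    intro r
    rw [digitSumLoopB]
    simp only [h, dite_true]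
    rw [ih, lowDigits_pos' m h]
    simp
    ring
  | case2 m h =>
    intro r
    rw [digitSumLoopB]
    simp [h, lowDigits_nonpos m h]

theorem digitsumB_eq (m : Int) : digitsumB m = (lowDigits m).sum := by
  rw [digitsumB, digitSumLoopB_eq]; ring

theorem lowDigits_pow10 (k : Nat) : lowDigits ((10:Int) ^ k) = List.replicate k 0 ++ [1] := by
  have hv : dvalid (List.replicate k (0:Int) ++ [1]) := by
    intro x hx
    rcases List.mem_append.1 hx with hx | hx
    · rw [List.eq_of_mem_replicate hx]; omega
    · simp at hx; omega
  have hz : (List.replicate k (0:Int) ++ [1]).getLast? ≠ some 0 := by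
    rw [List.getLast?_append_of_ne_nil _ (by simp)]
    simp
  have hd : dval (List.replicate k (0:Int) ++ [1]) = 10 ^ k := by
    rw [dval_append, dval_replicate_zero, List.length_replicate]
    have : dval [(1:Int)] = 1 + 10 * 0 := rfl
    rw [this]
    ring
  have := lowDigits_dval _ hv hz
  rw [hd] at this
  exact this

theorem loopB_eq (n s : Int) (J : Nat)
    (hJ : (lowDigits (roundup n ((10:Int) ^ J))).sum ≤ s)
    (hJmin : ∀ j < J, ¬ ((lowDigits (roundup n ((10:Int) ^ j))).sum ≤ s)) :
    ∀ fuel k, k ≤ J → J < k + fuel →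
      minMoveLoopB n s fuel ((10:Int) ^ k) = roundup n ((10:Int) ^ J) - n := by
  intro fuel
  induction fuel with
  | zero => intro k hk hf; omega
  | succ fuel ih =>
    intro k hk hf
    show (if digitsumB (PySem.Int.floordiv (n + 10 ^ k - 1) (10 ^ k) * 10 ^ k) ≤ s then
        PySem.Int.floordiv (n + 10 ^ k - 1) (10 ^ k) * 10 ^ k - n
      else minMoveLoopB n s fuel (10 ^ k * 10)) = roundup n ((10:Int) ^ J) - n
    have hcand : PySem.Int.floordiv (n + 10 ^ k - 1) ((10:Int) ^ k) * 10 ^ k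
        = roundup n ((10:Int) ^ k) := rfl
    rw [hcand, digitsumB_eq]
    by_cases hgood : (lowDigits (roundup n ((10:Int) ^ k))).sum ≤ s
    · rw [if_pos hgood]
      have hkJ : k = J := by
        by_contra hne
        exact hJmin k (by omega) hgood
      rw [hkJ]
    · rw [if_neg hgood]
      have hkJ : k ≠ J := fun hc => hgood (hc ▸ hJ)
      have h10 : (10:Int) ^ k * 10 = 10 ^ (k + 1) := by rw [pow_succ]
      rw [h10]
      exact ih (k + 1) (by omega) (by omega)

theorem loopA_eq (n s : Int) (hn : 1 ≤ n) (J : Nat)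
    (hJ : (lowDigits (roundup n ((10:Int) ^ J))).sum ≤ s)
    (hJmin : ∀ j < J, ¬ ((lowDigits (roundup n ((10:Int) ^ j))).sum ≤ s)) :
    ∀ fuel k m, m = roundup n ((10:Int) ^ k) → k ≤ J → J < k + fuel →
      minMoveLoopA s fuel (lowDigits m).sum m = roundup n ((10:Int) ^ J) := by
  intro fuel
  induction fuel with
  | zero => intro k m _ hk hf; omega
  | succ fuel ih =>
    intro k m hm hk hf
    have hkpos : (0:Int) < 10 ^ k := by positivity
    obtain ⟨hdvdk, hnle, hnlt⟩ := roundup_spec n ((10:Int) ^ k) hkpos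
    rw [← hm] at hdvdk hnle hnlt
    show (if s < (lowDigits m).sum then
        minMoveLoopA s fuel (increaseA m).1 (increaseA m).2
      else m) = roundup n ((10:Int) ^ J)
    by_cases hgood : s < (lowDigits m).sum
    · rw [if_pos hgood]
      have hkJ : k < J := by
        rcases Nat.lt_or_ge k J with h | h
        · exact h
        · exfalso
          have : k = J := by omega
          rw [this] at hm
          rw [← hm] at hJ
          omega
      have hmpos : 0 < m := by omega
      obtain ⟨i, hdi, hndi, heq⟩ := increaseA_spec m hmpos
      have hki : k ≤ i := by
        by_contra hlt
        exact hndi (dvd_trans (pow_dvd_pow 10 (by omega)) hdvdk)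
      -- roundup n (10^j) = m for k ≤ j ≤ i
      have hstable : ∀ j, k ≤ j → j ≤ i → roundup n ((10:Int) ^ j) = m := by
        intro j hkj hji
        apply roundup_eq _ _ _ (by positivity)
        · exact dvd_trans (pow_dvd_pow 10 hji) hdi
        · exact hnle
        · have : (10:Int) ^ k ≤ 10 ^ j := pow_le_pow_right₀ (by norm_num) hkj
          omega
      have hiJ : i + 1 ≤ J := by
        by_contra hc
        have hJi : J ≤ i := by omega
        have := hstable J hk hJi
        rw [this] at hJ
        omega
      have hipos : (0:Int) < 10 ^ (i + 1) := by positivity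
      obtain ⟨hdvd', hle', hlt'⟩ := roundup_spec m ((10:Int) ^ (i + 1)) hipos
      have hchain : roundup m ((10:Int) ^ (i + 1)) = roundup n ((10:Int) ^ (i + 1)) := by
        apply le_antisymm
        · apply roundup_min _ _ _ hipos (roundup_spec n _ hipos).1
          have hstep : m ≤ roundup n ((10:Int) ^ (i + 1)) := by
            rw [← hstable i hki le_rfl]
            apply roundup_min _ _ _ (by positivity)
            · exact dvd_trans (pow_dvd_pow 10 (by omega)) (roundup_spec n _ hipos).1
            · exact (roundup_spec n _ hipos).2.1
          exact hstep
        · apply roundup_min _ _ _ hipos hdvd'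
          omega
      rw [heq]
      simp only
      exact ih (i + 1) _ hchain hiJ (by omega)
    · rw [if_neg hgood]
      have hkJ : k = J := by
        by_contra hne
        have hklt : k < J := by omega
        apply hJmin k hklt
        rw [← hm]
        omega
      rw [hkJ] at hm
      omega

-- ===== VERDICT (by name: the statement is the Claim_ definition above) =====
theorem min_move_spec : Claim_equal_min_move := by
  intro n s hdom hpre
  unfold Spec_min_move min_move min_move_alt
  by_cases hns : n ≤ s
  · rw [if_pos hns, if_pos hns]
  · rw [if_neg hns, if_neg hns]
    have hs : 1 ≤ s := hpre.resolve_left hns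
    have hn : 1 ≤ n := by omega
    have hdn : n ≤ 2147483648 := by
      simp only [Dom_min_move, pvDomInt, Bool.and_eq_true, decide_eq_true_eq] at hdom
      exact hdom.1.2
    have h10 : roundup n ((10:Int) ^ 10) = 10 ^ 10 := by
      apply roundup_eq _ _ _ (by positivity) dvd_rfl
      · norm_num; omega
      · omega
    have hgood10 : (lowDigits (roundup n ((10:Int) ^ 10))).sum ≤ s := by
      rw [h10, lowDigits_pow10]
      simp
      omega
    have hex : ∃ j : Nat, (lowDigits (roundup n ((10:Int) ^ j))).sum ≤ s := ⟨10, hgood10⟩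
    have hJ := Nat.find_spec hex
    have hJmin : ∀ j < Nat.find hex, ¬ ((lowDigits (roundup n ((10:Int) ^ j))).sum ≤ s) :=
      fun j hj => Nat.find_min hex hj
    have hJle : Nat.find hex ≤ 10 := Nat.find_le hgood10
    have hstart : n = roundup n ((10:Int) ^ 0) := by
      rw [pow_zero]
      exact (roundup_eq n 1 n one_pos (one_dvd n) le_rfl (by omega)).symm
    have hA := loopA_eq n s hn (Nat.find hex) hJ hJmin 64 0 n hstart (by omega) (by omega)
    have hB := loopB_eq n s (Nat.find hex) hJ hJmin 64 0 (by omega) (by omega)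
    rw [digitsA_sum, hA]
    rw [pow_zero] at hB
    rw [hB]
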